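-- pv_equiv track=rewrite | github.com/rivanstunnel/scan_angka_otomatis | tab4.py | analyze_delay
-- ===== SOURCE A (Python) =====
-- def split_digits(num_str):
--     return [int(d) for d in str(num_str).zfill(4)]
--
-- def analyze_delay(data, pos):
--     delay = {i: 0 for i in range(10)}
--     last_seen = {i: -1 for i in range(10)}
--     delays = []
--     for idx, num in enumerate(data):
--         d = split_digits(num)[pos]
--         for i in range(10):
--             if i == d:
--                 if last_seen[i] != -1:
--                     delay[i] = idx - last_seen[i]
--                 last_seen[i] = idx
--         delays.append(delay.copy())
--     return delays[-1] if delays else {}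
-- ===== SOURCE B (Python) =====
-- def split_digits(num_str):
--     return [int(d) for d in str(num_str).zfill(4)]
--
-- def analyze_delay(data, pos):
--     if not data:
--         return {}
--     digits = [split_digits(num)[pos] for num in data]
--     out = {}
--     for i in range(10):
--         idxs = [k for k, d in enumerate(digits) if d == i]
--         out[i] = idxs[-1] - idxs[-2] if len(idxs) >= 2 else 0
--     return out
-- ===== Notes on version B (the rewrite author's own statement) =====
-- stated objective: simpler
-- what changed: B replaces A's running delay/last_seen dicts and per-step dict copies with two separate passes: one pass computing all position digits, then for each digit 0-9 its occurrence-index list, from which the answer is the gap between the last two occurrences (or 0).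
import Mathlib
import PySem

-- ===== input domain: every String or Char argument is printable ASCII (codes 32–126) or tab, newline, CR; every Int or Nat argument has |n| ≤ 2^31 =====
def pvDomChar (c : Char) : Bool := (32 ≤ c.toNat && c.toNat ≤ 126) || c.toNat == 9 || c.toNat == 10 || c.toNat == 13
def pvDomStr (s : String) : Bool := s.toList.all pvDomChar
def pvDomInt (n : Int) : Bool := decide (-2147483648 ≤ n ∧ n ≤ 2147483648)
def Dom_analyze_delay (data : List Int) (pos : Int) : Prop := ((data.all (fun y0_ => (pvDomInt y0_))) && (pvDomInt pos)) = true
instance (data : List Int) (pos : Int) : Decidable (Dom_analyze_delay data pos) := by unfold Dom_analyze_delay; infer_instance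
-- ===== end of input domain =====

-- B separates the work into two passes (compute all digits, then per-digit occurrence
-- lists with a last-gap formula) instead of A's running delay/last_seen dicts; objective: simpler.


-- ===== PORT A =====
-- split_digits: [int(d) for d in str(num_str).zfill(4)]; int('-') would raise
-- (Pre_ keeps the data nonnegative), so the port totalises the char parse with getD 0.
def split_digits (num : Int) : List Int :=
  (PySem.Chars.zfill (PySem.Int.toChars num) 4).map (fun c => (PySem.Int.ofChars? [c]).getD 0)

def analyze_delay (data : List Int) (pos : Int) : List (Int × Int) :=
  let delay0 := (PySem.List.pyRange 0 10 1).foldl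
      (fun d i => d.insert i 0) (PySem.Dict.empty : PySem.Dict Int Int)
  let last0 := (PySem.List.pyRange 0 10 1).foldl
      (fun d i => d.insert i (-1)) (PySem.Dict.empty : PySem.Dict Int Int)
  let st := (PySem.List.enumerate data 0).foldl
    (fun st p =>
      -- split_digits(num)[pos]: IndexError (pyGet? = none) is excluded by Pre_
      let d := (PySem.List.pyGet? (split_digits p.2) pos).getD 0
      let inner := (PySem.List.pyRange 0 10 1).foldl
        (fun q i =>
          if i == d then
            let q1 := if q.2.getD i 0 ≠ -1 then (q.1.insert i (p.1 - q.2.getD i 0), q.2) else q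
            (q1.1, q1.2.insert i p.1)
          else q) (st.1, st.2.1)
      (inner.1, inner.2, st.2.2 ++ [inner.1]))
    (delay0, last0, ([] : List (PySem.Dict Int Int)))
  match st.2.2.getLast? with
  | some dlast => dlast.items
  | none => []

-- ===== PORT B =====
def analyze_delay_alt (data : List Int) (pos : Int) : List (Int × Int) :=
  if data = [] then []
  else
    let digits := data.map (fun num => (PySem.List.pyGet? (split_digits num) pos).getD 0)
    ((PySem.List.pyRange 0 10 1).foldl
      (fun out i =>
        let idxs := ((PySem.List.enumerate digits 0).filter (fun p => p.2 == i)).map (fun p => p.1)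
        out.insert i
          (if 2 ≤ idxs.length then (PySem.List.pyGet? idxs (-1)).getD 0 - (PySem.List.pyGet? idxs (-2)).getD 0 else 0))
      (PySem.Dict.empty : PySem.Dict Int Int)).items

-- ===== PRECONDITION & SPEC =====
-- Pre_: every number is nonnegative (str() of a negative gives '-', on which int('-') raises
-- ValueError) and pos is a valid Python index into its 4-or-more digit list (else IndexError).
def Pre_analyze_delay (data : List Int) (pos : Int) : Prop :=
  ∀ num ∈ data, 0 ≤ num ∧ PySem.Raise.InRange (max 4 (PySem.Int.toChars num).length) pos
instance (data : List Int) (pos : Int) : Decidable (Pre_analyze_delay data pos) := by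
  unfold Pre_analyze_delay; infer_instance
def pvWitness_analyze_delay : List Int × Int := ([1234, 7, 1234, 42], 3)

def Spec_analyze_delay (data : List Int) (pos : Int) (out : List (Int × Int)) : Prop := out = analyze_delay_alt data pos
instance (data : List Int) (pos : Int) (out : List (Int × Int)) : Decidable (Spec_analyze_delay data pos out) := by unfold Spec_analyze_delay; infer_instance

-- ===== CLAIM (what is proved, stated in full; the proofs are below) =====
def Claim_equal_analyze_delay : Prop := ∀ (data : List Int) (pos : Int), Dom_analyze_delay data pos → Pre_analyze_delay data pos → Spec_analyze_delay data pos (analyze_delay data pos)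

-- ===== LEMMAS AND PROOFS =====

-- digit extracted at position pos
def pvDig (pos num : Int) : Int := (PySem.List.pyGet? (split_digits num) pos).getD 0

-- occurrence indices of value i in ds (what B builds)
def pvIdxs (ds : List Int) (i : Int) : List Int :=
  ((PySem.List.enumerate ds 0).filter (fun p => p.2 == i)).map (fun p => p.1)

-- B's per-digit value
def pvGap (ds : List Int) (i : Int) : Int :=
  let idxs := pvIdxs ds i
  if 2 ≤ idxs.length then (PySem.List.pyGet? idxs (-1)).getD 0 - (PySem.List.pyGet? idxs (-2)).getD 0 else 0

-- A's last_seen value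
def pvLast (ds : List Int) (i : Int) : Int := (pvIdxs ds i).getLast?.getD (-1)

-- a dict with keys 0..9 carrying f
def pvMkD (f : Int → Int) : PySem.Dict Int Int :=
  PySem.Dict.mk ((PySem.List.pyRange 0 10 1).map (fun i => (i, f i)))

theorem pvMkD_congr {f g : Int → Int} (h : ∀ i, 0 ≤ i → i < 10 → f i = g i) :
    pvMkD f = pvMkD g := by
  unfold pvMkD
  congr 1
  apply List.map_congr_left
  intro i hi
  rw [PySem.List.mem_pyRange_one] at hi
  rw [h i hi.1 hi.2]

theorem pvMkD_keys (f : Int → Int) : (pvMkD f).keys = PySem.List.pyRange 0 10 1 := by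
  unfold pvMkD
  rw [PySem.Dict.keys_mk, List.map_map]
  exact List.map_id _

theorem pvMkD_contains (f : Int → Int) (d : Int) (h0 : 0 ≤ d) (h1 : d < 10) :
    (pvMkD f).contains d = true := by
  rw [PySem.Dict.contains_eq_decide_mem_keys, pvMkD_keys]
  simp [PySem.List.mem_pyRange_one, h0, h1]

theorem pvMkD_getD (f : Int → Int) (d : Int) (h0 : 0 ≤ d) (h1 : d < 10) (d0 : Int) :
    (pvMkD f).getD d d0 = f d := by
  apply PySem.Dict.getD_of_mem_items
  · unfold pvMkD
    show (d, f d) ∈ List.map _ _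
    exact List.mem_map_of_mem (by rw [PySem.List.mem_pyRange_one]; exact ⟨h0, h1⟩)
  · rw [pvMkD_keys]; exact PySem.List.nodup_pyRange_one 0 10

theorem pvMkD_insert (f : Int → Int) (d v : Int) (h0 : 0 ≤ d) (h1 : d < 10) :
    (pvMkD f).insert d v = pvMkD (fun i => if i = d then v else f i) := by
  apply PySem.Dict.ext
  rw [PySem.Dict.items_insert, if_pos (pvMkD_contains f d h0 h1)]
  show List.map _ (List.map _ _) = _
  rw [List.map_map]
  show _ = List.map _ _
  apply List.map_congr_left
  intro i _
  by_cases h : i = d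
  · subst h; simp
  · simp [h]

-- inner loop over range(10): only key d is touched
theorem pvInner_id (d : Int) (body : PySem.Dict Int Int × PySem.Dict Int Int → Int → PySem.Dict Int Int × PySem.Dict Int Int)
    (hbody : ∀ q i, i ≠ d → body q i = q)
    (l : List Int) (hl : ∀ i ∈ l, i ≠ d) (q : PySem.Dict Int Int × PySem.Dict Int Int) :
    l.foldl body q = q := by
  induction l generalizing q with
  | nil => rfl
  | cons x xs ih =>
    rw [List.foldl_cons, hbody q x (hl x (by simp))]
    exact ih (fun i hi => hl i (by simp [hi])) q

-- the inner loop on abstract states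
theorem pvInner_step (D L : Int → Int) (d idx : Int) :
    (PySem.List.pyRange 0 10 1).foldl
      (fun q i =>
        if i == d then
          ((if q.2.getD i 0 ≠ -1 then (q.1.insert i (idx - q.2.getD i 0), q.2) else q).1,
           (if q.2.getD i 0 ≠ -1 then (q.1.insert i (idx - q.2.getD i 0), q.2) else q).2.insert i idx)
        else q) (pvMkD D, pvMkD L)
    = if 0 ≤ d ∧ d < 10 then
        (pvMkD (fun i => if i = d ∧ L d ≠ -1 then idx - L d else D i),
         pvMkD (fun i => if i = d then idx else L i))
      else (pvMkD D, pvMkD L) := by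
  have hb : ∀ (q : PySem.Dict Int Int × PySem.Dict Int Int) (i : Int), i ≠ d →
      (fun (q : PySem.Dict Int Int × PySem.Dict Int Int) (i : Int) =>
        if i == d then
          ((if q.2.getD i 0 ≠ -1 then (q.1.insert i (idx - q.2.getD i 0), q.2) else q).1,
           (if q.2.getD i 0 ≠ -1 then (q.1.insert i (idx - q.2.getD i 0), q.2) else q).2.insert i idx)
        else q) q i = q := by
    intro q i hi
    simp [hi]
  by_cases h : 0 ≤ d ∧ d < 10
  · rw [if_pos h]
    rw [PySem.List.pyRange_one_append 0 d 10 h.1 (by omega),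
        PySem.List.pyRange_one_cons (by omega : d < 10)]
    rw [List.foldl_append, List.foldl_cons]
    rw [pvInner_id d _ hb _ (fun i hi => by rw [PySem.List.mem_pyRange_one] at hi; omega)]
    rw [pvInner_id d _ hb _ (fun i hi => by rw [PySem.List.mem_pyRange_one] at hi; omega)
        (pvMkD D, pvMkD L)]
    simp only [beq_self_eq_true, if_pos]
    rw [show ((pvMkD D, pvMkD L) : PySem.Dict Int Int × PySem.Dict Int Int).2.getD d 0 = L d from
      pvMkD_getD L d h.1 h.2 0]
    by_cases hL : L d ≠ -1
    · rw [if_pos hL]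
      show ((pvMkD D).insert d (idx - L d), (pvMkD L).insert d idx) = _
      rw [pvMkD_insert D d (idx - L d) h.1 h.2, pvMkD_insert L d idx h.1 h.2]
      congr 1
      apply pvMkD_congr
      intro i _ _
      by_cases hi : i = d <;> simp [hi, hL]
    · rw [if_neg hL]
      show (pvMkD D, (pvMkD L).insert d idx) = _
      rw [pvMkD_insert L d idx h.1 h.2]
      congr 1
      apply pvMkD_congr
      intro i _ _
      by_cases hi : i = d <;> simp [hi, hL]
  · rw [if_neg h]
    exact pvInner_id d _ hb _ (fun i hi => by rw [PySem.List.mem_pyRange_one] at hi; omega) _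

-- pvIdxs over an appended element
theorem pvIdxs_append (ds : List Int) (x i : Int) :
    pvIdxs (ds ++ [x]) i = pvIdxs ds i ++ (if x = i then [(ds.length : Int)] else []) := by
  unfold pvIdxs
  rw [PySem.List.enumerate_append, List.filter_append, List.map_append]
  congr 1
  by_cases hx : x = i <;>
    simp [PySem.List.enumerate_cons, PySem.List.enumerate_nil, hx]

theorem pvIdxs_nonneg (ds : List Int) (i : Int) : ∀ k ∈ pvIdxs ds i, 0 ≤ k := by
  intro k hk
  unfold pvIdxs at hk
  obtain ⟨p, hp, rfl⟩ := List.mem_map.1 hk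
  obtain ⟨m, _, rfl⟩ := (PySem.List.mem_enumerate_iff ds 0 p).1 (List.mem_of_mem_filter hp)
  simp

theorem pvLast_append (ds : List Int) (x i : Int) :
    pvLast (ds ++ [x]) i = if i = x then (ds.length : Int) else pvLast ds i := by
  unfold pvLast
  rw [pvIdxs_append]
  by_cases hx : x = i
  · subst hx
    rw [if_pos rfl, List.getLast?_concat, if_pos rfl]
    rfl
  · rw [if_neg hx, List.append_nil, if_neg (fun h => hx h.symm)]

theorem pvGap_append (ds : List Int) (x i : Int) :
    pvGap (ds ++ [x]) i =
      if i = x ∧ pvLast ds x ≠ -1 then (ds.length : Int) - pvLast ds x else pvGap ds i := by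
  by_cases hx : i = x
  · subst hx
    unfold pvGap
    rw [pvIdxs_append, if_pos rfl]
    dsimp only
    by_cases hne : pvIdxs ds i = []
    · have hlast : pvLast ds i = -1 := by unfold pvLast; rw [hne]; rfl
      rw [hne]
      simp [hlast]
    · have hmem : (pvIdxs ds i).getLast hne ∈ pvIdxs ds i := List.getLast_mem hne
      have hpos : 0 ≤ (pvIdxs ds i).getLast hne := pvIdxs_nonneg ds i _ hmem
      have hlastv : pvLast ds i = (pvIdxs ds i).getLast hne := by
        unfold pvLast; rw [List.getLast?_eq_some_getLast hne]; rfl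
      have hLne : pvLast ds i ≠ -1 := by rw [hlastv]; omega
      have hL1 : 0 < (pvIdxs ds i).length := List.length_pos_of_ne_nil hne
      have hlen : (pvIdxs ds i ++ [(ds.length : Int)]).length = (pvIdxs ds i).length + 1 := by
        simp
      have hget1 : PySem.List.pyGet? (pvIdxs ds i ++ [(ds.length : Int)]) (-1)
          = some (ds.length : Int) := PySem.List.pyGet?_neg_one_append_singleton _ _
      have hget2 : PySem.List.pyGet? (pvIdxs ds i ++ [(ds.length : Int)]) (-2)
          = (pvIdxs ds i).getLast? := by
        rw [PySem.List.pyGet?_neg_ofNat _ 2 (by omega) (by omega)]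
        rw [hlen]
        rw [List.getElem?_append_left (by omega)]
        rw [List.getLast?_eq_getElem?,
          show (pvIdxs ds i).length + 1 - 2 = (pvIdxs ds i).length - 1 from by omega]
      rw [if_pos (show i = i ∧ pvLast ds i ≠ -1 from ⟨rfl, hLne⟩)]
      rw [if_pos (show 2 ≤ (pvIdxs ds i ++ [(ds.length : Int)]).length by rw [hlen]; omega)]
      rw [hget1, hget2, List.getLast?_eq_some_getLast hne, hlastv]
      rfl
  · unfold pvGap
    rw [pvIdxs_append,
        if_neg (show ¬ x = i from fun h => hx h.symm), List.append_nil,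
        if_neg (show ¬ (i = x ∧ pvLast ds x ≠ -1) from fun h => hx h.1)]

-- A's loop body, named for the proofs (identical to the lambda inside analyze_delay)
def pvStepA (pos : Int)
    (st : PySem.Dict Int Int × PySem.Dict Int Int × List (PySem.Dict Int Int))
    (p : Int × Int) : PySem.Dict Int Int × PySem.Dict Int Int × List (PySem.Dict Int Int) :=
  let d := (PySem.List.pyGet? (split_digits p.2) pos).getD 0
  let inner := (PySem.List.pyRange 0 10 1).foldl
    (fun q i =>
      if i == d then
        let q1 := if q.2.getD i 0 ≠ -1 then (q.1.insert i (p.1 - q.2.getD i 0), q.2) else q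
        (q1.1, q1.2.insert i p.1)
      else q) (st.1, st.2.1)
  (inner.1, inner.2, st.2.2 ++ [inner.1])

-- main loop invariant for A, by reverse induction on data
theorem pvLoopA (pos : Int) (data : List Int) :
    ((PySem.List.enumerate data 0).foldl (pvStepA pos)
        (pvMkD (fun _ => 0), pvMkD (fun _ => -1), ([] : List (PySem.Dict Int Int)))).1
      = pvMkD (fun i => pvGap (data.map (pvDig pos)) i)
    ∧ ((PySem.List.enumerate data 0).foldl (pvStepA pos)
        (pvMkD (fun _ => 0), pvMkD (fun _ => -1), ([] : List (PySem.Dict Int Int)))).2.1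
      = pvMkD (fun i => pvLast (data.map (pvDig pos)) i)
    ∧ ((PySem.List.enumerate data 0).foldl (pvStepA pos)
        (pvMkD (fun _ => 0), pvMkD (fun _ => -1), ([] : List (PySem.Dict Int Int)))).2.2.getLast?
      = (if data = [] then none
         else some (pvMkD (fun i => pvGap (data.map (pvDig pos)) i))) := by
  induction data using List.reverseRecOn with
  | nil =>
    refine ⟨rfl, rfl, rfl⟩
  | append_singleton xs x IH =>
    obtain ⟨IH1, IH2, IH3⟩ := IH
    have hxsne : ¬ (xs ++ [x] = []) := by simp
    rw [PySem.List.enumerate_append]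
    rw [List.foldl_append]
    set st := (PySem.List.enumerate xs 0).foldl (pvStepA pos)
        (pvMkD (fun _ => 0), pvMkD (fun _ => -1), ([] : List (PySem.Dict Int Int))) with hstdef
    have hst : st = (pvMkD (fun i => pvGap (xs.map (pvDig pos)) i),
                     pvMkD (fun i => pvLast (xs.map (pvDig pos)) i), st.2.2) := by
      calc st = (st.1, st.2.1, st.2.2) := rfl
        _ = _ := by rw [IH1, IH2]
    rw [hst]
    show (pvStepA pos _ _).1 = _ ∧ (pvStepA pos _ _).2.1 = _ ∧ (pvStepA pos _ _).2.2.getLast? = _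
    unfold pvStepA
    dsimp only
    rw [show (PySem.List.pyGet? (split_digits x) pos).getD 0 = pvDig pos x from rfl]
    rw [pvInner_step (fun i => pvGap (xs.map (pvDig pos)) i)
        (fun i => pvLast (xs.map (pvDig pos)) i) (pvDig pos x) (0 + (xs.length : Int))]
    have hmaplen : ((xs.map (pvDig pos)).length : Int) = 0 + (xs.length : Int) := by simp
    have hds : (xs ++ [x]).map (pvDig pos) = xs.map (pvDig pos) ++ [pvDig pos x] := by simp
    by_cases h : 0 ≤ pvDig pos x ∧ pvDig pos x < 10
    · rw [if_pos h]
      dsimp only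
      have hdelay : pvMkD (fun i => if i = pvDig pos x ∧ pvLast (xs.map (pvDig pos)) (pvDig pos x) ≠ -1
              then 0 + (xs.length : Int) - pvLast (xs.map (pvDig pos)) (pvDig pos x)
              else pvGap (xs.map (pvDig pos)) i)
          = pvMkD (fun i => pvGap ((xs ++ [x]).map (pvDig pos)) i) := by
        apply pvMkD_congr
        intro i _ _
        rw [hds, pvGap_append, ← hmaplen]
      have hlastd : pvMkD (fun i => if i = pvDig pos x then 0 + (xs.length : Int)
              else pvLast (xs.map (pvDig pos)) i)
          = pvMkD (fun i => pvLast ((xs ++ [x]).map (pvDig pos)) i) := by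
        apply pvMkD_congr
        intro i _ _
        rw [hds, pvLast_append, ← hmaplen]
      refine ⟨hdelay, hlastd, ?_⟩
      rw [if_neg hxsne, List.getLast?_concat, hdelay]
    · rw [if_neg h]
      dsimp only
      have hdelay : pvMkD (fun i => pvGap (xs.map (pvDig pos)) i)
          = pvMkD (fun i => pvGap ((xs ++ [x]).map (pvDig pos)) i) := by
        apply pvMkD_congr
        intro i hi0 hi1
        rw [hds, pvGap_append, if_neg (fun hc => by omega)]
      have hlastd : pvMkD (fun i => pvLast (xs.map (pvDig pos)) i)
          = pvMkD (fun i => pvLast ((xs ++ [x]).map (pvDig pos)) i) := by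
        apply pvMkD_congr
        intro i hi0 hi1
        rw [hds, pvLast_append, if_neg (fun hc => by omega)]
      refine ⟨hdelay, hlastd, ?_⟩
      rw [if_neg hxsne, List.getLast?_concat, hdelay]

theorem pvDelay0 : (PySem.List.pyRange 0 10 1).foldl
    (fun d i => d.insert i 0) (PySem.Dict.empty : PySem.Dict Int Int) = pvMkD (fun _ => 0) := by
  decide

theorem pvLast0 : (PySem.List.pyRange 0 10 1).foldl
    (fun d i => d.insert i (-1)) (PySem.Dict.empty : PySem.Dict Int Int) = pvMkD (fun _ => -1) := by
  decide

theorem pvTotal_eq (data : List Int) (pos : Int) :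
    analyze_delay data pos = analyze_delay_alt data pos := by
  rcases List.eq_nil_or_concat data with hnil | ⟨xs, x, rfl⟩
  · subst hnil
    rfl
  · simp only [List.concat_eq_append]
    have hne : ¬ (xs ++ [x] = []) := by simp
    unfold analyze_delay analyze_delay_alt
    rw [if_neg hne]
    rw [pvDelay0, pvLast0]
    have hstep : (fun (st : PySem.Dict Int Int × PySem.Dict Int Int × List (PySem.Dict Int Int))
        (p : Int × Int) =>
        let d := (PySem.List.pyGet? (split_digits p.2) pos).getD 0
        let inner := (PySem.List.pyRange 0 10 1).foldl
          (fun q i =>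
            if i == d then
              let q1 := if q.2.getD i 0 ≠ -1 then (q.1.insert i (p.1 - q.2.getD i 0), q.2) else q
              (q1.1, q1.2.insert i p.1)
            else q) (st.1, st.2.1)
        (inner.1, inner.2, st.2.2 ++ [inner.1])) = pvStepA pos := rfl
    rw [hstep]
    dsimp only
    rw [(pvLoopA pos (xs ++ [x])).2.2, if_neg hne]
    dsimp only
    have hdig : (fun num => (PySem.List.pyGet? (split_digits num) pos).getD 0) = pvDig pos := rfl
    rw [hdig]
    rw [PySem.Dict.items_foldl_insert_fresh (PySem.List.pyRange 0 10 1) (fun i => i) _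
        PySem.Dict.empty (fun a _ => PySem.Dict.contains_empty a)
        (by simpa using PySem.List.nodup_pyRange_one 0 10)]
    show _ = ([] : List (Int × Int)) ++ _
    rw [List.nil_append]
    rfl

-- ===== VERDICT (by name: the statement is the Claim_ definition above) =====
theorem analyze_delay_spec : Claim_equal_analyze_delay := by
  intro data pos _ _
  show _ = _
  exact pvTotal_eq data pos
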